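-- pv_equiv track=rewrite | github.com/vamseeachanta/energy | .agent-os/commands/test_automation_enhanced.py | _find_import_section_end
-- ===== SOURCE A (Python) =====
-- def _find_import_section_end(content: str) -> int:
--     """Find the end of import section in Python file."""
--     lines = content.split('\n')
--     last_import = -1
--
--     for i, line in enumerate(lines):
--         if line.strip().startswith(('import ', 'from ')):
--             last_import = i
--         elif last_import >= 0 and line.strip() and not line.strip().startswith('#'):
--             # Found first non-import, non-comment line
--             break
--
--     if last_import >= 0:
--         # Return position after last import
--         return sum(len(line) + 1 for line in lines[:last_import + 1])
--
--     return 0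
-- ===== SOURCE B (Python) =====
-- def _tag(line: str) -> str:
--     """Classify a line: 'i' import line, 'c' code line, '.' blank/comment."""
--     s = line.strip()
--     if s.startswith('import ') or s.startswith('from '):
--         return 'i'
--     if s and not s.startswith('#'):
--         return 'c'
--     return '.'
--
--
-- def _find_import_section_end(content: str) -> int:
--     """Find the end of import section in Python file.
--
--     Staged, declarative version: tag every line once, then locate the section
--     boundaries by pure index arithmetic on the tag list (no stateful scan)."""
--     lines = content.split('\n')
--     tags = [_tag(line) for line in lines]
--     if 'i' not in tags:
--         return 0
--     first = tags.index('i')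
--     after = tags[first + 1:]
--     stop = first + 1 + after.index('c') if 'c' in after else len(tags)
--     head = tags[:stop]
--     last = len(head) - 1 - head[::-1].index('i')
--     return sum(len(line) + 1 for line in lines[:last + 1])
-- ===== Notes on version B (the rewrite author's own statement) =====
-- stated objective: alternative
-- what changed: B replaces A's stateful scan-with-break by a staged declarative computation: it classifies every line once into a tag list ('i' import / 'c' code / '.' filler) and then finds the section boundaries by pure index arithmetic (index of first 'i', first 'c' after it, last 'i' before that via a reversed-slice index) before summing the prefix byte lengths.
import Mathlib
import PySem

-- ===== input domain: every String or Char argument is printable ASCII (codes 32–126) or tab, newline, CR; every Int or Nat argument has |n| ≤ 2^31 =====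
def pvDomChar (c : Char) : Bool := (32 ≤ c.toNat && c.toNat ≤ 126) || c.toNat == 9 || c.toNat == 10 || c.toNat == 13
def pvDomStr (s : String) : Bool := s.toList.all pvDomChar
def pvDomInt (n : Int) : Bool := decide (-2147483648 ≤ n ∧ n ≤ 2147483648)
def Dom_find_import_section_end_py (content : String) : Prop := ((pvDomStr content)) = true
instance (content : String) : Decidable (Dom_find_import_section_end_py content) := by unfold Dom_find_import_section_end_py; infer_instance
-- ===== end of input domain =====

-- B replaces A's stateful scan-with-break by a staged computation: tag each line once
-- ('i' import / 'c' code / '.' filler), then locate the boundaries by index arithmetic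
-- on the tag list (objective: alternative decomposition, same cost).

-- ===== PORT A =====
-- the for-loop of A: lines still to process, current index i, current last_import
def pvALoop : List String → Int → Int → Int
  | [], _, last => last
  | l :: ls, i, last =>
    let s := PySem.Str.strip l
    if PySem.Str.startswith s "import " || PySem.Str.startswith s "from " then
      pvALoop ls (i + 1) i
    else if decide (last ≥ 0) && (PySem.Str.len s != 0) && !PySem.Str.startswith s "#" then
      last  -- break
    else
      pvALoop ls (i + 1) last

def find_import_section_end_py (content : String) : Int :=
  let lines := (PySem.Str.split? content "\n").getD []
  let last := pvALoop lines 0 (-1)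
  if last ≥ 0 then
    (PySem.List.slice lines none (some (last + 1))).foldl
      (fun acc l => acc + (PySem.Str.len l + 1)) 0
  else 0

-- ===== PORT B =====
-- Source B's _tag helper
def pvTag (line : String) : Char :=
  let s := PySem.Str.strip line
  if PySem.Str.startswith s "import " || PySem.Str.startswith s "from " then 'i'
  else if (PySem.Str.len s != 0) && !PySem.Str.startswith s "#" then 'c'
  else '.'

-- Source B's staged body on the split lines
def pvBStaged (lines : List String) : Int :=
  let tags := lines.map pvTag
  if 'i' ∈ tags then
    let first : Nat := (PySem.List.index? tags 'i').getD 0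
    let after := PySem.List.slice tags (some ((first : Int) + 1)) none
    let stop : Nat := if 'c' ∈ after then first + 1 + (PySem.List.index? after 'c').getD 0
                      else tags.length
    let head := PySem.List.slice tags none (some (stop : Int))
    let lastB : Int := (head.length : Int) - 1 -
      (((PySem.List.index? ((PySem.List.slice? head none none (-1)).getD []) 'i').getD 0 : Nat) : Int)
    ((PySem.List.slice lines none (some (lastB + 1))).map (fun l => PySem.Str.len l + 1)).sum
  else 0

def find_import_section_end_py_alt (content : String) : Int :=
  pvBStaged ((PySem.Str.split? content "\n").getD [])

-- ===== PRECONDITION & SPEC =====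
def Spec_find_import_section_end_py (content : String) (out : Int) : Prop := out = find_import_section_end_py_alt content
instance (content : String) (out : Int) : Decidable (Spec_find_import_section_end_py content out) := by unfold Spec_find_import_section_end_py; infer_instance

-- ===== CLAIM (what is proved, stated in full; the proofs are below) =====
def Claim_equal_find_import_section_end_py : Prop := ∀ (content : String), Dom_find_import_section_end_py content → Spec_find_import_section_end_py content (find_import_section_end_py content)

-- ===== LEMMAS AND PROOFS =====

-- byte length of a list of lines, each counted with its newline
def pvS (xs : List String) : Int := (xs.map (fun l => PySem.Str.len l + 1)).sum

theorem pvFoldl_eq_pvS (xs : List String) (a : Int) :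
    xs.foldl (fun acc l => acc + (PySem.Str.len l + 1)) a = a + pvS xs := by
  induction xs generalizing a with
  | nil => simp [pvS]
  | cons l ls ih => rw [List.foldl_cons, ih]; simp only [pvS, List.map_cons, List.sum_cons]; ring

-- invariant tying A's loop state (last) to the tag structure of the consumed prefix
def pvInv (pre : List String) (last : Int) : Prop :=
  (last = -1 ∧ 'i' ∉ pre.map pvTag)
  ∨ (∃ p q u v : List Char,
      pre.map pvTag = p ++ 'i' :: q ∧ 'i' ∉ q ∧ last = (p.length : Int)
      ∧ pre.map pvTag = u ++ 'i' :: v ∧ 'i' ∉ u ∧ 'c' ∉ v)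

-- evaluation of B's staged body when the tag list decomposes as
-- (no-'i' prefix u) 'i' (no-'c' middle v) followed by [] or a 'c'-headed rest,
-- with the LAST 'i' of u++'i'::v at position p.length
theorem pvEvalB (lines : List String) (u v p q rtags : List Char)
    (htags : lines.map pvTag = (u ++ 'i' :: v) ++ rtags)
    (hu : 'i' ∉ u) (hv : 'c' ∉ v)
    (hr : rtags = [] ∨ ∃ r', rtags = 'c' :: r')
    (hpq : u ++ 'i' :: v = p ++ 'i' :: q) (hq : 'i' ∉ q) :
    pvBStaged lines = pvS (lines.take (p.length + 1)) := by
  have hmem : 'i' ∈ lines.map pvTag := by rw [htags]; simp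
  have hfirst : PySem.List.index? (lines.map pvTag) 'i' = some u.length :=
    (PySem.List.index?_eq_some_iff _ _ _).mpr ⟨u, v ++ rtags, by rw [htags]; simp, rfl, hu⟩
  have hafter : PySem.List.slice (lines.map pvTag) (some ((u.length : Int) + 1)) none
      = v ++ rtags := by
    have h1 : ((u.length : Int) + 1) = (((u.length + 1 : Nat)) : Int) := by push_cast; ring
    rw [h1, PySem.List.slice_from_natCast, htags]
    have h2 : (u ++ 'i' :: v) ++ rtags = (u ++ ['i']) ++ (v ++ rtags) := by simp
    rw [h2]
    have h3 : u.length + 1 = (u ++ ['i']).length := by simp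
    rw [h3, List.drop_left]
  have hstop : (if 'c' ∈ (v ++ rtags) then
        u.length + 1 + (PySem.List.index? (v ++ rtags) 'c').getD 0
      else (lines.map pvTag).length) = u.length + 1 + v.length := by
    rcases hr with hnil | ⟨r', hr'⟩
    · subst hnil
      rw [if_neg (by simpa using hv)]
      rw [htags]
      simp only [List.append_nil, List.length_append, List.length_cons]
      omega
    · subst hr'
      rw [if_pos (by simp)]
      have : PySem.List.index? (v ++ 'c' :: r') 'c' = some v.length :=
        (PySem.List.index?_eq_some_iff _ _ _).mpr ⟨v, r', rfl, rfl, hv⟩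
      rw [this]; rfl
  have hhead : PySem.List.slice (lines.map pvTag) none (some ((u.length + 1 + v.length : Nat) : Int))
      = u ++ 'i' :: v := by
    rw [PySem.List.slice_to_natCast, htags]
    have h3 : u.length + 1 + v.length = (u ++ 'i' :: v).length := by
      simp only [List.length_append, List.length_cons]; omega
    rw [h3, List.take_left]
  have hrev : (PySem.List.slice? (u ++ 'i' :: v) none none (-1)).getD []
      = (u ++ 'i' :: v).reverse := by
    rw [PySem.List.slice?_none_none_neg_one]; rfl
  have hrevdec : (u ++ 'i' :: v).reverse = q.reverse ++ 'i' :: p.reverse := by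
    rw [hpq]; simp
  have hlastidx : PySem.List.index? ((u ++ 'i' :: v).reverse) 'i' = some q.length :=
    (PySem.List.index?_eq_some_iff _ _ _).mpr
      ⟨q.reverse, p.reverse, by rw [hrevdec], by simp, by simpa using hq⟩
  have hlen : (u ++ 'i' :: v).length = p.length + 1 + q.length := by
    rw [hpq]; simp only [List.length_append, List.length_cons]; omega
  have hlastB : ((u ++ 'i' :: v).length : Int) - 1 - (q.length : Int) + 1
      = ((p.length + 1 : Nat) : Int) := by
    rw [hlen]; push_cast; ring
  have hfinal : PySem.List.slice lines none (some (((p.length + 1 : Nat)) : Int))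
      = lines.take (p.length + 1) := PySem.List.slice_to_natCast lines _
  simp only [pvBStaged]
  rw [if_pos hmem, hfirst]
  simp only [Option.getD_some]
  rw [hafter, hstop, hhead, hrev, hlastidx]
  simp only [Option.getD_some]
  rw [hlastB, hfinal]
  rfl

-- the break/terminate value of A rewritten as pvS of a take
theorem pvABreak (lines : List String) (k : Nat) :
    (PySem.List.slice lines none (some ((k : Int) + 1))).foldl
      (fun acc l => acc + (PySem.Str.len l + 1)) 0 = pvS (lines.take (k + 1)) := by
  have h1 : ((k : Int) + 1) = (((k + 1 : Nat)) : Int) := by push_cast; ring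
  rw [h1, PySem.List.slice_to_natCast, pvFoldl_eq_pvS, zero_add]

-- main induction: A's loop from any reachable state computes B's staged value
theorem pvKey (ls : List String) : ∀ (pre : List String) (last : Int), pvInv pre last →
    (if pvALoop ls (pre.length : Int) last ≥ 0 then
        (PySem.List.slice (pre ++ ls) none (some (pvALoop ls (pre.length : Int) last + 1))).foldl
          (fun acc l => acc + (PySem.Str.len l + 1)) 0
      else 0) = pvBStaged (pre ++ ls) := by
  induction ls with
  | nil =>
    intro pre last hinv
    simp only [pvALoop, List.append_nil]
    rcases hinv with ⟨h1, h2⟩ | ⟨p, q, u, v, hp, hq, hl, hu2, hu, hv⟩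
    · rw [if_neg (by omega)]
      simp only [pvBStaged]
      rw [if_neg h2]
    · rw [if_pos (by omega), hl, pvABreak]
      exact (pvEvalB pre u v p q [] (by rw [hu2]; simp) hu hv (Or.inl rfl)
        (hu2.symm.trans hp) hq).symm
  | cons l ls ih =>
    intro pre last hinv
    simp only [pvALoop]
    by_cases himp : (PySem.Str.startswith (PySem.Str.strip l) "import "
        || PySem.Str.startswith (PySem.Str.strip l) "from ") = true
    · rw [if_pos himp]
      have htagl : pvTag l = 'i' := by simp only [pvTag]; rw [if_pos himp]
      have hlen : ((pre ++ [l]).length : Int) = (pre.length : Int) + 1 := by simp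
      have hmap : (pre ++ [l]).map pvTag = pre.map pvTag ++ ['i'] := by simp [htagl]
      have hinv' : pvInv (pre ++ [l]) (pre.length : Int) := by
        rcases hinv with ⟨h1, h2⟩ | ⟨p, q, u, v, hp, hq, hl', hu2, hu, hv⟩
        · exact Or.inr ⟨pre.map pvTag, [], pre.map pvTag, [],
            by rw [hmap], by simp, by simp,
            by rw [hmap], h2, by simp⟩
        · refine Or.inr ⟨pre.map pvTag, [], u, v ++ ['i'],
            by rw [hmap], by simp, by simp, ?_, hu, by simp [hv]⟩
          rw [hmap, hu2]; simp
      have := ih (pre ++ [l]) (pre.length : Int) hinv'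
      rw [hlen] at this
      simpa using this
    · rw [if_neg himp]
      by_cases hbrk : (decide (last ≥ 0) && (PySem.Str.len (PySem.Str.strip l) != 0)
          && !PySem.Str.startswith (PySem.Str.strip l) "#") = true
      · rw [if_pos hbrk]
        have h0 : 0 ≤ last := by
          simp only [Bool.and_eq_true, decide_eq_true_eq] at hbrk; omega
        rcases hinv with ⟨h1, _⟩ | ⟨p, q, u, v, hp, hq, hl', hu2, hu, hv⟩
        · omega
        · have hc : ((PySem.Str.len (PySem.Str.strip l) != 0)
              && !PySem.Str.startswith (PySem.Str.strip l) "#") = true := by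
            simp only [Bool.and_eq_true] at hbrk ⊢
            exact ⟨hbrk.1.2, hbrk.2⟩
          have htagl : pvTag l = 'c' := by
            simp only [pvTag]; rw [if_neg himp, if_pos hc]
          rw [if_pos (by omega), hl', pvABreak]
          exact (pvEvalB (pre ++ l :: ls) u v p q (pvTag l :: ls.map pvTag)
            (by rw [List.map_append, hu2]; rfl)
            hu hv (Or.inr ⟨ls.map pvTag, by rw [htagl]⟩)
            (hu2.symm.trans hp) hq).symm
      · rw [if_neg hbrk]
        have htagl : pvTag l ≠ 'i' := by
          simp only [pvTag]
          rw [if_neg himp]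
          split <;> decide
        have hlen : ((pre ++ [l]).length : Int) = (pre.length : Int) + 1 := by simp
        have hinv' : pvInv (pre ++ [l]) last := by
          rcases hinv with ⟨h1, h2⟩ | ⟨p, q, u, v, hp, hq, hl', hu2, hu, hv⟩
          · refine Or.inl ⟨h1, ?_⟩
            simp only [List.map_append, List.map_cons, List.map_nil, List.mem_append,
              List.mem_singleton]
            rintro (h | h)
            · exact h2 h
            · exact htagl h.symm
          · have htagl' : pvTag l = '.' := by
              by_cases hc : ((PySem.Str.len (PySem.Str.strip l) != 0)
                  && !PySem.Str.startswith (PySem.Str.strip l) "#") = true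
              · exfalso; apply hbrk
                rw [Bool.and_assoc]
                have hd : decide (last ≥ 0) = true := by
                  rw [decide_eq_true_eq, hl']; positivity
                rw [hd, Bool.true_and]; exact hc
              · simp only [pvTag]; rw [if_neg himp, if_neg hc]
            refine Or.inr ⟨p, q ++ ['.'], u, v ++ ['.'], ?_, by simp [hq], hl', ?_, hu, by simp [hv]⟩
            · rw [List.map_append, hp]; simp [htagl']
            · rw [List.map_append, hu2]; simp [htagl']
        have := ih (pre ++ [l]) last hinv'
        rw [hlen] at this
        simpa using this

-- ===== VERDICT (by name: the statement is the Claim_ definition above) =====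
theorem find_import_section_end_py_spec : Claim_equal_find_import_section_end_py := by
  intro content _
  unfold Spec_find_import_section_end_py find_import_section_end_py find_import_section_end_py_alt
  have := pvKey ((PySem.Str.split? content "\n").getD []) [] (-1) (Or.inl ⟨rfl, by simp⟩)
  simpa using this
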